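-- pv_equiv track=rewrite | github.com/ThomasTrepanier/log6307-final-project | data/pyscent/stackoverflow/code-dump/23919_85.py | convert
-- ===== SOURCE A (Python) =====
-- def convert(i):
--     output = ''
--     pos = 0
--     while i:
--         if i & 1:
--             output += 'ABCDE'[pos]
--         pos += 1
--         i >>= 1
--     return output
-- ===== SOURCE B (Python) =====
-- def convert(i):
--     def go(n, letters):
--         if n == 0:
--             return ''
--         head = letters[0] if n & 1 else ''
--         return head + go(n >> 1, letters[1:])
--     return go(i, 'ABCDE')
-- ===== Notes on version B (the rewrite author's own statement) =====
-- stated objective: alternative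
-- what changed: Replaces A's iterative loop (shift i, position counter, string accumulator indexing a fixed alphabet) by a recursion that consumes the alphabet itself by slicing, prepending the current letter to the recursive result, with no position variable or accumulator.
import Mathlib
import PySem

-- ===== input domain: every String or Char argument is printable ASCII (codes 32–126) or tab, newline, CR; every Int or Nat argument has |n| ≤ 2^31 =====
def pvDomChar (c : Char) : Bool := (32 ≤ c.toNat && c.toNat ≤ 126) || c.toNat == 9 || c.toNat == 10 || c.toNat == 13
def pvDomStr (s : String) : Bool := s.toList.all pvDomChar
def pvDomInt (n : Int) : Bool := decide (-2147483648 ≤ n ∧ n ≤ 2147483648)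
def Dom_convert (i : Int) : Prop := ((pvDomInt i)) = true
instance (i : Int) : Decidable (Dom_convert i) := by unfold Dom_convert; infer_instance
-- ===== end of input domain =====

-- B replaces A's iterative shift/pos-counter/accumulator loop by a recursion that consumes the
-- alphabet itself by slicing and prepends each letter to the recursive result; objective: alternative.

-- ===== PORT A =====
-- A's while loop as fuel-indexed recursion (fuel = n bounds the halvings; same state: n, pos, output).
-- 'ABCDE'[pos] is PySem.Str.pyGet?; the none case (pos ≥ 5) is Python's IndexError, outside Pre_convert.
def convertLoop (fuel : Nat) (n : Nat) (pos : Nat) (output : String) : String :=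
  match fuel with
  | 0 => output
  | fuel + 1 =>
    if n = 0 then output
    else
      let output' := if n % 2 = 1 then
          match PySem.Str.pyGet? "ABCDE" (pos : Int) with
          | some c => output.push c
          | none => output      -- Python raises IndexError here (excluded by Pre_convert)
        else output
      convertLoop fuel (n / 2) (pos + 1) output'

def convert (i : Int) : String :=
  -- For i < 0 Python's loop runs until 'ABCDE'[pos] raises IndexError; excluded by Pre_convert.
  if i < 0 then "" else convertLoop i.toNat i.toNat 0 ""

-- ===== PORT B =====
-- Source B's inner 'go', fuel-indexed for termination (fuel = i bounds the halvings inside Pre_).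
-- 'n & 1' on Int is 'mod n 2' (equal for every sign in Python); 'n >> 1' is 'floordiv n 2';
-- letters[0] on an exhausted alphabet is Python's IndexError ('' here, excluded by Pre_convert).
def convertGo (fuel : Nat) (n : Int) (letters : List Char) : String :=
  match fuel with
  | 0 => ""
  | fuel + 1 =>
    if n = 0 then ""
    else
      let head := if PySem.Int.mod n 2 = 1 then
          match letters with
          | c :: _ => String.mk [c]
          | [] => ""      -- Python raises IndexError here (excluded by Pre_convert)
        else ""
      head ++ convertGo fuel (PySem.Int.floordiv n 2) (letters.drop 1)

def convert_alt (i : Int) : String :=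
  convertGo i.toNat i "ABCDE".toList

-- ===== PRECONDITION & SPEC =====
-- Pre_ excludes i < 0 and i ≥ 32: on both A raises IndexError ('ABCDE'[pos] with pos = 5), so it
-- admits exactly the inputs on which A returns (B raises IndexError on the same inputs).
def Pre_convert (i : Int) : Prop := 0 ≤ i ∧ i < 32
instance (i : Int) : Decidable (Pre_convert i) := by unfold Pre_convert; infer_instance
def pvWitness_convert : Int := (21)

def Spec_convert (i : Int) (out : String) : Prop := out = convert_alt i
instance (i : Int) (out : String) : Decidable (Spec_convert i out) := by unfold Spec_convert; infer_instance

-- ===== CLAIM (what is proved, stated in full; the proofs are below) =====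
def Claim_equal_convert : Prop := ∀ (i : Int), Dom_convert i → Pre_convert i → Spec_convert i (convert i)

-- ===== LEMMAS AND PROOFS =====

-- ===== VERDICT (by name: the statement is the Claim_ definition above) =====
theorem convert_spec : Claim_equal_convert := by
  unfold Claim_equal_convert
  intro i _ hp
  obtain ⟨h0, h31⟩ := hp
  interval_cases i <;> decide
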